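-- pv_equiv track=rewrite | github.com/Linyue-dev/PIV_Python_Lab | Test_1_review/dict_prefixes.py | prefixes
-- ===== SOURCE A (Python) =====
-- def prefixes(list) -> dict:
--     prefix_dict = {}
--     prefix_set = set()
--     for word in list:
--         charactor = ""
--         for i in range(len(word)):
--             charactor += word[i]
--             prefix_set.add(charactor)
--             if charactor in prefix_dict:
--                 prefix_dict[charactor] += 1
--             else:
--                 prefix_dict[charactor] = 1
--     return prefix_dict
-- ===== SOURCE B (Python) =====
-- def prefixes(list) -> dict:
--     result = {}
--     for word in list:
--         for i in range(1, len(word) + 1):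
--             p = word[:i]
--             if p not in result:
--                 result[p] = sum(1 for v in list if v.startswith(p))
--     return result
-- ===== Notes on version B (the rewrite author's own statement) =====
-- stated objective: alternative
-- what changed: B replaces A's per-occurrence increment counting (and its unused auxiliary set) with a closed-form count: each prefix is entered once, at its first occurrence, with its value computed directly as the number of words that start with it.
import Mathlib
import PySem

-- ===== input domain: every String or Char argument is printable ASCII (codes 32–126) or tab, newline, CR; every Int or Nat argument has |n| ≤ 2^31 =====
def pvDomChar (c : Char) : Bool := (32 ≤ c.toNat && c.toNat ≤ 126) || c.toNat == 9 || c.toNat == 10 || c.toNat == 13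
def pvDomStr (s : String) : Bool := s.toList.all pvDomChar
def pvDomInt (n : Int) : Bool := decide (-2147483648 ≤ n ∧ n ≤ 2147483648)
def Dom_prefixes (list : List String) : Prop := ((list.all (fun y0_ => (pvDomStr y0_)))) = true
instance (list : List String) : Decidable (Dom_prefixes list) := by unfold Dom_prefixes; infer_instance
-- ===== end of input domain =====

-- B replaces A's per-occurrence increment counting (and A's unused auxiliary set) with a closed-form
-- count entered once per distinct prefix (the number of words starting with it); alternative decomposition.

-- ===== PORT A =====
-- i ranges over range(len(word)), so word[i] never raises; pyGet?'s Option is defaulted, the default is never hit.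
def prefixes (list : List String) : List (String × Int) :=
  let final :=
    list.foldl
      (fun (st : PySem.Dict String Int × PySem.Set String) word =>
        let r :=
          (PySem.List.pyRange 0 (PySem.Str.len word) 1).foldl
            (fun (st2 : PySem.Dict String Int × PySem.Set String × String) i =>
              let charactor := st2.2.2.push ((PySem.Str.pyGet? word i).getD ' ')
              let prefix_set := PySem.Set.add st2.2.1 charactor
              let prefix_dict :=
                if st2.1.contains charactor then
                  st2.1.insert charactor (st2.1.getD charactor 0 + 1)
                else
                  st2.1.insert charactor 1
              (prefix_dict, prefix_set, charactor))
            (st.1, st.2, "")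
        (r.1, r.2.1))
      (PySem.Dict.empty, PySem.Set.empty)
  final.1.items

-- ===== PORT B =====
def prefixes_alt (list : List String) : List (String × Int) :=
  (list.foldl
    (fun (result : PySem.Dict String Int) word =>
      (PySem.List.pyRange 1 (PySem.Str.len word + 1) 1).foldl
        (fun result i =>
          let p := PySem.Str.slice word none (some i)
          if result.contains p then result
          else
            result.insert p
              (list.foldl (fun acc v => acc + (if PySem.Str.startswith v p then 1 else 0)) 0))
        result)
    PySem.Dict.empty).items

-- ===== PRECONDITION & SPEC =====
def Spec_prefixes (list : List String) (out : List (String × Int)) : Prop := out = prefixes_alt list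
instance (list : List String) (out : List (String × Int)) : Decidable (Spec_prefixes list out) := by unfold Spec_prefixes; infer_instance

-- ===== CLAIM (what is proved, stated in full; the proofs are below) =====
def Claim_equal_prefixes : Prop := ∀ (list : List String), Dom_prefixes list → Spec_prefixes list (prefixes list)

-- ===== LEMMAS AND PROOFS =====

/-- The prefixes (lengths 1..n) of a word, in order. -/
def prefChars (cs : List Char) : List String :=
  (List.range cs.length).map (fun k => String.ofList (cs.take (k+1)))

/-- The flattened stream of all prefixes of all words. -/
def streamOf (l : List String) : List String :=
  l.flatMap (fun w => prefChars w.toList)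

/-- A's dict step, branch-collapsed. -/
def cstep (d : PySem.Dict String Int) (p : String) : PySem.Dict String Int :=
  d.insert p (d.getD p 0 + 1)

/-- B's dict step (v = the value stored at a fresh key). -/
def bstep (v : String → Int) (d : PySem.Dict String Int) (p : String) : PySem.Dict String Int :=
  if d.contains p then d else d.insert p (v p)

lemma ofList_push (l : List Char) (c : Char) :
    (String.ofList l).push c = String.ofList (l ++ [c]) := by
  rw [← String.toList_inj]; simp

lemma slice_pref (w : String) (k : Nat) :
    PySem.Str.slice w none (some (1 + (k : Int))) = String.ofList (w.toList.take (k+1)) := by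
  rw [← String.toList_inj]
  rw [PySem.Str.toList_slice, String.toList_ofList]
  have : (1 + (k : Int)) = ((1 + k : Nat) : Int) := by push_cast; ring
  rw [this]
  show PySem.List.slice _ _ _ = _
  rw [PySem.List.slice_to_natCast]
  simp [Nat.add_comm]

lemma sum_acc (f : String → Bool) (l : List String) : ∀ (a : Int),
    l.foldl (fun acc v => acc + (if f v then 1 else 0)) a = a + (l.countP f : Int) := by
  induction l with
  | nil => simp
  | cons x xs ih =>
    intro a
    simp only [List.foldl_cons, List.countP_cons, ih]
    by_cases h : f x <;> simp [h] <;> push_cast <;> ring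

lemma mem_stream_ne_nil (list : List String) (p : String) (hp : p ∈ streamOf list) :
    p.toList ≠ [] := by
  simp only [streamOf, List.mem_flatMap, prefChars, List.mem_map, List.mem_range] at hp
  obtain ⟨w, _, k, hk, rfl⟩ := hp
  simp only [String.toList_ofList]
  intro h
  have := congrArg List.length h
  rw [List.length_take, List.length_nil] at this
  omega

lemma count_prefChars (w p : String) (hp : p.toList ≠ []) :
    (prefChars w.toList).count p = if PySem.Str.startswith w p then 1 else 0 := by
  set cs := w.toList with hcs
  set t := p.toList with ht
  set m := t.length with hm
  have hm1 : 1 ≤ m := by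
    rcases t with _ | _
    · exact absurd rfl hp
    · simp [hm]
  have hsw : PySem.Str.startswith w p = true ↔ t <+: cs := by
    rw [PySem.Str.startswith_eq, PySem.Chars.startswith_iff]
  unfold prefChars
  rw [List.count_eq_countP, List.countP_map]
  have key : ∀ k ∈ List.range cs.length,
      ((fun x => x == p) ∘ fun k => String.ofList (cs.take (k+1))) k = true
        ↔ (decide (k = m - 1) && decide (cs.take m = t)) = true := by
    intro k hk
    rw [List.mem_range] at hk
    simp only [Function.comp, beq_iff_eq, Bool.and_eq_true, decide_eq_true_eq]
    constructor
    · intro h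
      have h' : cs.take (k+1) = t := by
        rw [← String.toList_inj] at h
        simpa using h
      have hlen := congrArg List.length h'
      rw [List.length_take] at hlen
      have : k + 1 = m := by omega
      constructor
      · omega
      · rw [← this] at *; exact h'
    · rintro ⟨rfl, h2⟩
      rw [← String.toList_inj]
      have : m - 1 + 1 = m := by omega
      simp only [String.toList_ofList, this, h2]
      exact ht
  rw [List.countP_congr key]
  by_cases hpre : (t <+: cs)
  · have htake : cs.take m = t := (List.prefix_iff_eq_take.mp hpre).symm
    have hmn : m ≤ cs.length := hpre.length_le
    rw [if_pos (hsw.mpr hpre)]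
    have key2 : ∀ k ∈ List.range cs.length,
        (decide (k = m - 1) && decide (cs.take m = t)) = true ↔ (k == (m-1)) = true := by
      intro k _
      simp [htake]
    rw [List.countP_congr key2, ← List.count_eq_countP,
      List.count_eq_one_of_mem (List.nodup_range) (by rw [List.mem_range]; omega)]
  · rw [if_neg (fun h => hpre (hsw.mp h))]
    have htake : cs.take m ≠ t := by
      intro h
      exact hpre (h ▸ List.take_prefix m cs)
    apply List.countP_eq_zero.mpr
    intro k _
    simp [htake]

lemma cnt_eq_count (list : List String) (p : String) (hp : p.toList ≠ []) :
    list.foldl (fun acc v => acc + (if PySem.Str.startswith v p then 1 else 0)) (0 : Int)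
      = ((streamOf list).count p : Int) := by
  rw [sum_acc]
  have : (streamOf list).count p = list.countP (fun v => PySem.Str.startswith v p) := by
    induction list with
    | nil => simp [streamOf]
    | cons w ws ih =>
      simp only [streamOf, List.flatMap_cons, List.count_append, List.countP_cons] at *
      rw [ih, count_prefChars w p hp]
      by_cases h : PySem.Str.startswith w p <;> simp [h] <;> omega
  omega

lemma bfold_items (v : String → Int) (T : List String) :
    T.foldl (bstep v) PySem.Dict.empty
      = PySem.Dict.mk ((PySem.Set.ofList T).map (fun p => (p, v p))) := by
  induction T using List.reverseRecOn with
  | nil => rfl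
  | append_singleton T' p ih =>
    rw [List.foldl_append, List.foldl_cons, List.foldl_nil, ih,
      PySem.Set.ofList_append_singleton]
    have hkeys : (PySem.Dict.mk ((PySem.Set.ofList T').map (fun p => (p, v p)))).keys
        = PySem.Set.ofList T' := by
      rw [PySem.Dict.keys_mk, List.map_map]
      exact List.map_id _
    by_cases hp : p ∈ PySem.Set.ofList T'
    · have hc : (PySem.Dict.mk ((PySem.Set.ofList T').map (fun p => (p, v p)))).contains p = true := by
        rw [PySem.Dict.contains_iff_mem_keys, hkeys]; exact hp
      rw [bstep, if_pos hc, PySem.Set.add_of_mem hp]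
    · have hc : (PySem.Dict.mk ((PySem.Set.ofList T').map (fun p => (p, v p)))).contains p = false := by
        rw [Bool.eq_false_iff]
        intro h
        have := (PySem.Dict.contains_iff_mem_keys _ _).mp h
        rw [hkeys] at this
        exact hp this
      rw [bstep, if_neg (by simp [hc]), PySem.Set.add_of_not_mem hp]
      apply PySem.Dict.ext
      rw [PySem.Dict.items_insert_of_not_contains _ _ hc]
      simp

lemma innerB (v : String → Int) (w : String) (d : PySem.Dict String Int) :
    (PySem.List.pyRange 1 (PySem.Str.len w + 1) 1).foldl
      (fun result i =>
        let p := PySem.Str.slice w none (some i)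
        if result.contains p then result else result.insert p (v p))
      d
    = (prefChars w.toList).foldl (bstep v) d := by
  rw [PySem.List.pyRange_one]
  have hb : (PySem.Str.len w + 1 - 1).toNat = w.toList.length := by
    rw [PySem.Str.len_eq]; omega
  rw [hb, List.foldl_map]
  unfold prefChars
  rw [List.foldl_map]
  apply PySem.List.foldl_congr_mem
  intro acc x _
  simp only [slice_pref, bstep]

lemma innerA (w : String) : ∀ (m j : Nat), j + m = w.toList.length →
    ∀ (d : PySem.Dict String Int) (s : PySem.Set String),
    ((PySem.List.pyRange (j : Int) (w.toList.length : Int) 1).foldl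
      (fun (st2 : PySem.Dict String Int × PySem.Set String × String) i =>
        let charactor := st2.2.2.push ((PySem.Str.pyGet? w i).getD ' ')
        let prefix_set := PySem.Set.add st2.2.1 charactor
        let prefix_dict :=
          if st2.1.contains charactor then
            st2.1.insert charactor (st2.1.getD charactor 0 + 1)
          else
            st2.1.insert charactor 1
        (prefix_dict, prefix_set, charactor))
      (d, s, String.ofList (w.toList.take j))).1
    = ((List.range m).map (fun k => String.ofList (w.toList.take (j+k+1)))).foldl cstep d := by
  intro m
  induction m with
  | zero =>
    intro j hj d s
    rw [PySem.List.pyRange_one_eq_nil (by omega)]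
    simp
  | succ m ih =>
    intro j hj d s
    rw [PySem.List.pyRange_one_cons (by omega : (j:Int) < (w.toList.length : Int))]
    rw [List.foldl_cons]
    have hget : (PySem.Str.pyGet? w (j : Int)).getD ' ' = w.toList[j]'(by omega) := by
      rw [PySem.Str.pyGet?_natCast, List.getElem?_eq_getElem (by omega)]
      rfl
    have hch : (String.ofList (w.toList.take j)).push ((PySem.Str.pyGet? w (j:Int)).getD ' ')
        = String.ofList (w.toList.take (j+1)) := by
      rw [hget, ofList_push, List.take_add_one, List.getElem?_eq_getElem (by omega)]
      rfl
    have hcast : ((j : Int) + 1) = ((j + 1 : Nat) : Int) := by push_cast; ring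
    simp only [hch, hcast]
    have hdict : ∀ (d' : PySem.Dict String Int) (ch : String),
        (if d'.contains ch then d'.insert ch (d'.getD ch 0 + 1) else d'.insert ch 1)
          = cstep d' ch := by
      intro d' ch
      by_cases hc : d'.contains ch = true
      · rw [if_pos hc]; rfl
      · rw [if_neg (by simp_all), cstep,
          PySem.Dict.getD_of_not_contains _ _ (by simp_all)]
        norm_num
    rw [hdict]
    rw [ih (j+1) (by omega) (cstep d (String.ofList (w.toList.take (j+1)))) _]
    rw [List.range_succ_eq_map, List.map_cons, List.foldl_cons, List.map_map]
    have : j + 0 + 1 = j + 1 := by omega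
    rw [this]
    congr 1
    apply List.map_congr_left
    intro k _
    simp only [Function.comp]
    congr 2
    omega

lemma outer_gen : ∀ (l : List String) (d : PySem.Dict String Int) (s : PySem.Set String),
    (l.foldl
      (fun (st : PySem.Dict String Int × PySem.Set String) word =>
        let r :=
          (PySem.List.pyRange 0 (PySem.Str.len word) 1).foldl
            (fun (st2 : PySem.Dict String Int × PySem.Set String × String) i =>
              let charactor := st2.2.2.push ((PySem.Str.pyGet? word i).getD ' ')
              let prefix_set := PySem.Set.add st2.2.1 charactor
              let prefix_dict :=
                if st2.1.contains charactor then
                  st2.1.insert charactor (st2.1.getD charactor 0 + 1)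
                else
                  st2.1.insert charactor 1
              (prefix_dict, prefix_set, charactor))
            (st.1, st.2, "")
        (r.1, r.2.1))
      (d, s)).1
    = (l.flatMap (fun w => prefChars w.toList)).foldl cstep d := by
  intro l
  induction l with
  | nil => intro d s; simp
  | cons word ws ih =>
    intro d s
    rw [List.foldl_cons, List.flatMap_cons, List.foldl_append]
    have h0 : PySem.Str.len word = ((word.toList.length : Nat) : Int) := by
      rw [PySem.Str.len_eq]
    have hinner := innerA word word.toList.length 0 (by omega) d s
    simp only [Nat.cast_zero] at hinner
    have hpref : (prefChars word.toList).foldl cstep d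
        = ((List.range word.toList.length).map
            (fun k => String.ofList (word.toList.take (0+k+1)))).foldl cstep d := by
      unfold prefChars
      congr 1
      apply List.map_congr_left
      intro k _
      congr 2
      omega
    rw [ih, hpref, ← hinner, h0]
    rfl

lemma A_items (list : List String) :
    prefixes list
      = (PySem.Set.ofList (streamOf list)).map
          (fun k => (k, ((streamOf list).count k : Int))) := by
  show (_ : PySem.Dict String Int).items = _
  rw [outer_gen list PySem.Dict.empty PySem.Set.empty]
  unfold cstep
  rw [PySem.Dict.foldl_insert_getD_add_one_eq_counter, PySem.Dict.items_counter]
  simp only [streamOf]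

lemma B_items (list : List String) :
    prefixes_alt list
      = (PySem.Set.ofList (streamOf list)).map
          (fun p => (p, list.foldl
            (fun acc v => acc + (if PySem.Str.startswith v p then 1 else 0)) (0 : Int))) := by
  unfold prefixes_alt
  have h1 : ∀ d, list.foldl
      (fun (result : PySem.Dict String Int) word =>
        (PySem.List.pyRange 1 (PySem.Str.len word + 1) 1).foldl
          (fun result i =>
            let p := PySem.Str.slice word none (some i)
            if result.contains p then result
            else
              result.insert p
                (list.foldl (fun acc v => acc + (if PySem.Str.startswith v p then 1 else 0)) 0))
          result) d
      = (streamOf list).foldl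
          (bstep (fun p => list.foldl (fun acc v => acc + (if PySem.Str.startswith v p then 1 else 0)) 0)) d := by
    intro d
    rw [streamOf, List.foldl_flatMap]
    apply PySem.List.foldl_congr_mem
    intro acc w _
    exact innerB (fun p => list.foldl (fun acc v => acc + (if PySem.Str.startswith v p then 1 else 0)) 0) w acc
  rw [h1, bfold_items]

-- ===== VERDICT (by name: the statement is the Claim_ definition above) =====
theorem prefixes_spec : Claim_equal_prefixes := by
  intro list _
  unfold Spec_prefixes
  rw [A_items, B_items]
  apply List.map_congr_left
  intro p hp
  have hmem : p ∈ streamOf list := (PySem.Set.mem_ofList _ _).mp hp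
  rw [cnt_eq_count list p (mem_stream_ne_nil list p hmem)]
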